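-- pv_equiv track=rewrite | github.com/wafflehops/2048solver | src/slide.py | slide_right
-- ===== SOURCE A (Python) =====
-- def slide_right(row):
--     left_bound = 0
--     ans = []
--
--     for i in range(len(row)):
--         if row[i] == 2048:
--             ans.append(_slide_right(row[left_bound:i]))
--             left_bound = i + 1
--             ans.append([2048])
--
--     ans.append(_slide_right(row[left_bound:]))
--
--     return [x for y in ans for x in y]
--
-- def _slide_right(row):
--     filtered = list(filter(lambda x : (x != 0), row))
--
--     return [0] * (len(row) - len(filtered)) + filtered
-- ===== SOURCE B (Python) =====
-- def slide_right(row):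
--     rev = []
--     zeros = 0
--     for v in reversed(row):
--         if v == 2048:
--             rev.extend([0] * zeros)
--             rev.append(2048)
--             zeros = 0
--         elif v == 0:
--             zeros += 1
--         else:
--             rev.append(v)
--     rev.extend([0] * zeros)
--     rev.reverse()
--     return rev
-- ===== Notes on version B (the rewrite author's own statement) =====
-- stated objective: alternative
-- what changed: Replaces A's barrier-segment slicing + per-segment filter/zero-padding + nested-list flatten with a single backward pass over the row that counts zeros, emits nonzeros and barriers into a reversed buffer, and reverses once at the end.
import Mathlib
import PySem

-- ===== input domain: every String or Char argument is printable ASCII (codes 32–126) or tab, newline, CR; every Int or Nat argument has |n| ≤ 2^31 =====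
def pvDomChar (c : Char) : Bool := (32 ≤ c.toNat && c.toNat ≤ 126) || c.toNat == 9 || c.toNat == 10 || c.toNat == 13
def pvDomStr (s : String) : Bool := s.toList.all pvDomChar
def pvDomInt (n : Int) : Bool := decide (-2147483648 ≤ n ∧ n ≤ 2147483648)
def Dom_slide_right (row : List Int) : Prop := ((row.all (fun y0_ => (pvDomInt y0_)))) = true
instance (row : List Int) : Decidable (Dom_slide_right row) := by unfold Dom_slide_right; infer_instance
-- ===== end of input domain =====

-- B replaces A's segment slicing/filter/flatten with a single backward pass that counts zeros and builds the output back-to-front (objective: alternative decomposition).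

-- ===== PORT A =====
-- Python helper _slide_right
def slideRightSegA (row : List Int) : List Int :=
  let filtered := row.filter (fun x => x ≠ 0)
  List.replicate (row.length - filtered.length) 0 ++ filtered

-- one iteration of A's `for i in range(len(row))` loop; state = (left_bound, ans)
def stepA (row : List Int) (s : Int × List (List Int)) (i : Int) : Int × List (List Int) :=
  if PySem.List.pyGetD row i 0 = 2048 then
    (i + 1, s.2 ++ [slideRightSegA (PySem.List.slice row (some s.1) (some i)), [2048]])
  else s

def slide_right (row : List Int) : List Int :=
  let st := (PySem.List.pyRange 0 ((row.length : Nat) : Int) 1).foldl (stepA row) (0, [])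
  let ans := st.2 ++ [slideRightSegA (PySem.List.slice row (some st.1) none)]
  ans.flatMap id

-- ===== PORT B =====
-- one iteration of B's loop over reversed(row); state = (rev, zeros)
def stepB (s : List Int × Nat) (v : Int) : List Int × Nat :=
  if v = 2048 then (s.1 ++ List.replicate s.2 0 ++ [2048], 0)
  else if v = 0 then (s.1, s.2 + 1)
  else (s.1 ++ [v], s.2)

def slide_right_alt (row : List Int) : List Int :=
  let st := row.reverse.foldl stepB ([], 0)
  (st.1 ++ List.replicate st.2 0).reverse

-- ===== PRECONDITION & SPEC =====
def Spec_slide_right (row : List Int) (out : List Int) : Prop := out = slide_right_alt row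
instance (row : List Int) (out : List Int) : Decidable (Spec_slide_right row out) := by unfold Spec_slide_right; infer_instance

-- ===== CLAIM (what is proved, stated in full; the proofs are below) =====
def Claim_equal_slide_right : Prop := ∀ (row : List Int), Dom_slide_right row → Spec_slide_right row (slide_right row)

-- ===== LEMMAS AND PROOFS =====

lemma count_zero_eq (l : List Int) :
    l.length - (l.filter (fun x => x ≠ 0)).length = l.count 0 := by
  induction l with
  | nil => simp
  | cons v l ih =>
    have hle := List.length_filter_le (fun x => !decide (x = 0)) l
    simp only [ne_eq, decide_not] at ih ⊢
    by_cases h0 : v = 0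
    · subst h0
      simp
      omega
    · simp [h0]
      omega

lemma padA_eq (l : List Int) :
    slideRightSegA l = List.replicate (l.count 0) 0 ++ l.filter (fun x => x ≠ 0) := by
  simp only [slideRightSegA]
  rw [count_zero_eq]

lemma stepB_shift (l : List Int) : ∀ (r : List Int) (z : Nat),
    l.foldl stepB (r, z) = (r ++ (l.foldl stepB ([], z)).1, (l.foldl stepB ([], z)).2) := by
  induction l with
  | nil => intro r z; simp
  | cons v l ih =>
    intro r z
    simp only [List.foldl_cons, stepB]
    split_ifs with h1 h2
    · rw [ih (r ++ List.replicate z 0 ++ [2048]) 0, ih ([] ++ List.replicate z 0 ++ [2048]) 0]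
      simp
    · exact ih r (z + 1)
    · rw [ih (r ++ [v]) z, ih ([] ++ [v]) z]
      simp

lemma stepB_nob (l : List Int) : (2048 : Int) ∉ l → ∀ z : Nat,
    l.foldl stepB ([], z) = (l.filter (fun x => x ≠ 0), z + l.count 0) := by
  induction l with
  | nil => intro _ z; simp
  | cons v l ih =>
    intro h z
    have hv : v ≠ 2048 := fun hv => h (hv ▸ List.mem_cons_self)
    have hl : (2048 : Int) ∉ l := fun hl => h (List.mem_cons_of_mem _ hl)
    simp only [List.foldl_cons, stepB, if_neg hv]
    by_cases h0 : v = 0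
    · subst h0
      simp only [if_pos trivial]
      rw [ih hl (z+1)]
      simp
      omega
    · simp only [if_neg h0]
      rw [stepB_shift, ih hl z]
      simp [h0]

lemma B_nob (l : List Int) (h : (2048 : Int) ∉ l) : slide_right_alt l = slideRightSegA l := by
  have hr : (2048 : Int) ∉ l.reverse := by simpa using h
  rw [padA_eq]
  simp only [slide_right_alt]
  rw [stepB_nob l.reverse hr 0]
  simp [List.filter_reverse, List.count_reverse]

lemma B_split (xs ys : List Int) (h : (2048 : Int) ∉ xs) :
    slide_right_alt (xs ++ 2048 :: ys) = slideRightSegA xs ++ 2048 :: slide_right_alt ys := by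
  simp only [slide_right_alt]
  have hrev : (xs ++ 2048 :: ys).reverse = ys.reverse ++ 2048 :: xs.reverse := by simp
  rw [hrev, List.foldl_append, List.foldl_cons]
  have h2048 : stepB (ys.reverse.foldl stepB ([], 0)) 2048
      = ((ys.reverse.foldl stepB ([], 0)).1 ++ List.replicate (ys.reverse.foldl stepB ([], 0)).2 0 ++ [2048], 0) := by
    simp [stepB]
  rw [h2048]
  have hxr : (2048 : Int) ∉ xs.reverse := by simpa using h
  rw [stepB_shift, stepB_nob xs.reverse hxr 0, padA_eq]
  simp [List.filter_reverse, List.count_reverse]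

lemma A_id (row : List Int) (l : List Int) (s : Int × List (List Int))
    (h : ∀ i ∈ l, PySem.List.pyGetD row i (0:Int) ≠ 2048) : l.foldl (stepA row) s = s := by
  induction l generalizing s with
  | nil => simp
  | cons i l ih =>
    simp only [List.foldl_cons, stepA, if_neg (h i List.mem_cons_self)]
    exact ih _ (fun j hj => h j (List.mem_cons_of_mem _ hj))

lemma A_nob (row : List Int) (h : (2048 : Int) ∉ row) : slide_right row = slideRightSegA row := by
  simp only [slide_right]
  have hi : ∀ i ∈ PySem.List.pyRange 0 ((row.length : Nat) : Int) 1,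
      PySem.List.pyGetD row i (0:Int) ≠ 2048 := by
    intro i hi
    rw [PySem.List.mem_pyRange_one] at hi
    have hmem : PySem.List.pyGetD row i (0:Int) ∈ row := by
      apply PySem.List.pyGetD_mem
      simp only [PySem.Raise.InRange]
      omega
    exact fun he => h (he ▸ hmem)
  rw [A_id row _ _ hi]
  simp [PySem.List.slice_none_none]

lemma getD_shift (pre rest : List Int) (a : Int) (ha : 0 ≤ a) :
    PySem.List.pyGetD (pre ++ rest) ((pre.length : Int) + a) (0:Int) = PySem.List.pyGetD rest a 0 := by
  obtain ⟨n, rfl⟩ : ∃ n : Nat, a = (n : Int) := ⟨a.toNat, (Int.toNat_of_nonneg ha).symm⟩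
  have hc : (pre.length : Int) + (n : Int) = ((pre.length + n : Nat) : Int) := by push_cast; ring
  rw [hc, PySem.List.pyGetD_natCast, PySem.List.pyGetD_natCast]
  simp only [List.getD_eq_getElem?_getD]
  rw [List.getElem?_append_right (by omega)]
  simp

lemma slice_shift (pre rest : List Int) (m a : Int) (hm : 0 ≤ m) (ha : 0 ≤ a) :
    PySem.List.slice (pre ++ rest) (some ((pre.length : Int) + m)) (some ((pre.length : Int) + a))
      = PySem.List.slice rest (some m) (some a) := by
  obtain ⟨n, rfl⟩ : ∃ n : Nat, a = (n : Int) := ⟨a.toNat, (Int.toNat_of_nonneg ha).symm⟩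
  obtain ⟨k, rfl⟩ : ∃ k : Nat, m = (k : Int) := ⟨m.toNat, (Int.toNat_of_nonneg hm).symm⟩
  have hc1 : (pre.length : Int) + (n : Int) = ((pre.length + n : Nat) : Int) := by push_cast; ring
  have hc2 : (pre.length : Int) + (k : Int) = ((pre.length + k : Nat) : Int) := by push_cast; ring
  rw [hc1, hc2, PySem.List.slice_natCast, PySem.List.slice_natCast]
  have hd : (pre ++ rest).drop (pre.length + k) = rest.drop k := by
    rw [List.drop_append, List.drop_eq_nil_of_le (by omega : pre.length ≤ pre.length + k)]
    simp
  rw [hd]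
  congr 1
  omega

lemma slice_from_shift (pre rest : List Int) (m : Int) (hm : 0 ≤ m) :
    PySem.List.slice (pre ++ rest) (some ((pre.length : Int) + m)) none
      = PySem.List.slice rest (some m) none := by
  obtain ⟨k, rfl⟩ : ∃ k : Nat, m = (k : Int) := ⟨m.toNat, (Int.toNat_of_nonneg hm).symm⟩
  have hc : (pre.length : Int) + (k : Int) = ((pre.length + k : Nat) : Int) := by push_cast; ring
  rw [hc, PySem.List.slice_from_natCast, PySem.List.slice_from_natCast]
  rw [List.drop_append, List.drop_eq_nil_of_le (by omega : pre.length ≤ pre.length + k)]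
  simp

lemma lb_nonneg (row : List Int) (l : List Int) (hl : ∀ i ∈ l, (0:Int) ≤ i) :
    ∀ (m : Int) (ans : List (List Int)), 0 ≤ m → 0 ≤ (l.foldl (stepA row) (m, ans)).1 := by
  induction l with
  | nil => intro m ans hm; simpa using hm
  | cons i l ih =>
    intro m ans hm
    have hi : (0:Int) ≤ i := hl i List.mem_cons_self
    have hl' : ∀ j ∈ l, (0:Int) ≤ j := fun j hj => hl j (List.mem_cons_of_mem _ hj)
    simp only [List.foldl_cons, stepA]
    split_ifs with hcond
    · exact ih hl' _ _ (by omega)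
    · exact ih hl' _ _ hm

lemma stepA_shift (pre rest : List Int) : ∀ (len : Nat) (a m : Int), 0 ≤ a → 0 ≤ m →
    ∀ (ans0 ans : List (List Int)),
    (PySem.List.pyRange ((pre.length : Int) + a) ((pre.length : Int) + a + (len : Int)) 1).foldl
        (stepA (pre ++ rest)) ((pre.length : Int) + m, ans0 ++ ans)
      = ((pre.length : Int) + ((PySem.List.pyRange a (a + (len : Int)) 1).foldl (stepA rest) (m, ans)).1,
         ans0 ++ ((PySem.List.pyRange a (a + (len : Int)) 1).foldl (stepA rest) (m, ans)).2) := by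
  intro len
  induction len with
  | zero =>
    intro a m ha hm ans0 ans
    have h1 : PySem.List.pyRange ((pre.length : Int) + a) ((pre.length : Int) + a + ((0:Nat):Int)) 1 = [] :=
      PySem.List.pyRange_one_eq_nil (by simp)
    have h2 : PySem.List.pyRange a (a + ((0:Nat):Int)) 1 = [] :=
      PySem.List.pyRange_one_eq_nil (by simp)
    rw [h1, h2]
    simp
  | succ len ih =>
    intro a m ha hm ans0 ans
    have hr1 : PySem.List.pyRange ((pre.length : Int) + a) ((pre.length : Int) + a + ((len+1:Nat):Int)) 1
        = ((pre.length : Int) + a) :: PySem.List.pyRange ((pre.length : Int) + a + 1) ((pre.length : Int) + a + ((len+1:Nat):Int)) 1 :=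
      PySem.List.pyRange_one_cons (by push_cast; omega)
    have hr2 : PySem.List.pyRange a (a + ((len+1:Nat):Int)) 1
        = a :: PySem.List.pyRange (a + 1) (a + ((len+1:Nat):Int)) 1 :=
      PySem.List.pyRange_one_cons (by push_cast; omega)
    rw [hr1, hr2, List.foldl_cons, List.foldl_cons]
    have e1 : (pre.length : Int) + a + ((len+1:Nat):Int) = (pre.length : Int) + (a + 1) + ((len:Nat):Int) := by
      push_cast; ring
    have e2 : a + ((len+1:Nat):Int) = (a + 1) + ((len:Nat):Int) := by push_cast; ring
    have e3 : (pre.length : Int) + a + 1 = (pre.length : Int) + (a + 1) := by ring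
    rw [e1, e2, e3]
    have hstepL : stepA (pre ++ rest) ((pre.length : Int) + m, ans0 ++ ans) ((pre.length : Int) + a)
        = if PySem.List.pyGetD rest a (0:Int) = 2048 then
            ((pre.length : Int) + (a + 1),
             ans0 ++ (ans ++ [slideRightSegA (PySem.List.slice rest (some m) (some a)), [2048]]))
          else ((pre.length : Int) + m, ans0 ++ ans) := by
      simp only [stepA, getD_shift pre rest a ha, slice_shift pre rest m a hm ha]
      split_ifs with hc <;> simp [add_assoc]
    have hstepR : stepA rest (m, ans) a
        = if PySem.List.pyGetD rest a (0:Int) = 2048 then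
            (a + 1, ans ++ [slideRightSegA (PySem.List.slice rest (some m) (some a)), [2048]])
          else (m, ans) := by
      simp only [stepA]
    rw [hstepL, hstepR]
    split_ifs with hc
    · exact ih (a + 1) (a + 1) (by omega) (by omega) ans0 _
    · exact ih (a + 1) m (by omega) hm ans0 ans

lemma A_split (xs ys : List Int) (h : (2048 : Int) ∉ xs) :
    slide_right (xs ++ 2048 :: ys) = slideRightSegA xs ++ 2048 :: slide_right ys := by
  have hrow : xs ++ 2048 :: ys = (xs ++ [2048]) ++ ys := by simp
  simp only [slide_right]
  have hlen : (((xs ++ 2048 :: ys).length : Nat) : Int)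
      = ((xs.length : Nat) : Int) + 1 + ((ys.length : Nat) : Int) := by
    simp
    ring
  have hsplit : PySem.List.pyRange 0 (((xs ++ 2048 :: ys).length : Nat) : Int) 1
      = PySem.List.pyRange 0 ((xs.length : Nat) : Int) 1
        ++ (((xs.length : Nat) : Int) :: PySem.List.pyRange (((xs.length : Nat) : Int) + 1) (((xs ++ 2048 :: ys).length : Nat) : Int) 1) := by
    have hc : ((xs.length : Nat) : Int) < (((xs ++ 2048 :: ys).length : Nat) : Int) := by
      rw [hlen]; omega
    rw [PySem.List.pyRange_one_append 0 ((xs.length : Nat) : Int) _ (by positivity) (le_of_lt hc)]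
    rw [PySem.List.pyRange_one_cons (a := ((xs.length : Nat) : Int)) hc]
  rw [hsplit, List.foldl_append, List.foldl_cons]
  have h1 : ∀ i ∈ PySem.List.pyRange 0 ((xs.length : Nat) : Int) 1,
      PySem.List.pyGetD (xs ++ 2048 :: ys) i (0:Int) ≠ 2048 := by
    intro i hi
    rw [PySem.List.mem_pyRange_one] at hi
    obtain ⟨k, rfl⟩ : ∃ k : Nat, i = (k : Int) := ⟨i.toNat, (Int.toNat_of_nonneg hi.1).symm⟩
    have hk : k < xs.length := by exact_mod_cast hi.2
    rw [PySem.List.pyGetD_natCast]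
    simp only [List.getD_eq_getElem?_getD]
    rw [List.getElem?_append_left hk]
    have hmem : xs[k] ∈ xs := List.getElem_mem hk
    simp only [List.getElem?_eq_getElem hk, Option.getD_some]
    exact fun he => h (he ▸ hmem)
  rw [A_id _ _ _ h1]
  have hstep : stepA (xs ++ 2048 :: ys) (0, []) ((xs.length : Nat) : Int)
      = (((xs.length : Nat) : Int) + 1, [slideRightSegA xs, [2048]]) := by
    have hget : PySem.List.pyGetD (xs ++ 2048 :: ys) ((xs.length : Nat) : Int) (0:Int) = 2048 := by
      rw [PySem.List.pyGetD_natCast]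
      simp only [List.getD_eq_getElem?_getD]
      rw [List.getElem?_append_right (le_refl xs.length)]
      simp
    have hslice : PySem.List.slice (xs ++ 2048 :: ys) (some 0) (some ((xs.length : Nat) : Int)) = xs := by
      rw [PySem.List.slice_zero_start, PySem.List.slice_to_natCast]
      exact List.take_left ..
    simp [stepA, hget, hslice]
  rw [hstep]
  have hF0 : (0 : Int) + ((ys.length : Nat) : Int) = ((ys.length : Nat) : Int) := by ring
  have hshift := stepA_shift (xs ++ [2048]) ys ys.length 0 0 le_rfl le_rfl
      [slideRightSegA xs, [2048]] []
  rw [hF0] at hshift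
  have epre : (((xs ++ [2048]).length : Nat) : Int) = ((xs.length : Nat) : Int) + 1 := by
    simp
  rw [epre] at hshift
  have eans : [slideRightSegA xs, [2048]] ++ ([] : List (List Int)) = [slideRightSegA xs, [2048]] := by simp
  rw [eans] at hshift
  have erange : ((xs.length : Nat) : Int) + 1 + 0 = ((xs.length : Nat) : Int) + 1 := by ring
  rw [show ((xs.length : Nat) : Int) + 1 + 0 + ((ys.length : Nat) : Int) = (((xs ++ 2048 :: ys).length : Nat) : Int) by rw [hlen]; ring,
      erange] at hshift
  rw [← hrow] at hshift
  rw [hshift]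
  set F := (PySem.List.pyRange 0 ((ys.length : Nat) : Int) 1).foldl (stepA ys) (0, ([] : List (List Int))) with hFdef
  have hF1 : 0 ≤ F.1 := by
    apply lb_nonneg ys _ _ 0 [] le_rfl
    intro i hi
    rw [PySem.List.mem_pyRange_one] at hi
    exact hi.1
  have hsl : PySem.List.slice (xs ++ 2048 :: ys) (some (((xs.length : Nat) : Int) + 1 + F.1)) none
      = PySem.List.slice ys (some F.1) none := by
    rw [hrow]
    rw [show ((xs.length : Nat) : Int) + 1 + F.1 = (((xs ++ [2048]).length : Nat) : Int) + F.1 by rw [epre]]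
    exact slice_from_shift (xs ++ [2048]) ys F.1 hF1
  rw [hsl]
  simp only [List.flatMap_append, List.flatMap_cons, List.flatMap_nil, id]
  simp

lemma first_split (l : List Int) (h : (2048 : Int) ∈ l) :
    ∃ xs ys, l = xs ++ 2048 :: ys ∧ (2048 : Int) ∉ xs := by
  induction l with
  | nil => simp at h
  | cons v l ih =>
    by_cases hv : v = 2048
    · exact ⟨[], l, by simp [hv], by simp⟩
    · have hl : (2048 : Int) ∈ l := by
        rcases List.mem_cons.1 h with h1 | h1
        · exact absurd h1.symm hv
        · exact h1
      obtain ⟨xs, ys, rfl, hxs⟩ := ih hl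
      refine ⟨v :: xs, ys, rfl, ?_⟩
      intro hm
      rcases List.mem_cons.1 hm with h1 | h1
      · exact hv h1.symm
      · exact hxs h1

lemma main_eq : ∀ (n : Nat) (row : List Int), row.length ≤ n → slide_right row = slide_right_alt row := by
  intro n
  induction n with
  | zero =>
    intro row h
    have : row = [] := List.eq_nil_of_length_eq_zero (by omega)
    subst this
    decide
  | succ n ih =>
    intro row h
    by_cases hm : (2048 : Int) ∈ row
    · obtain ⟨xs, ys, rfl, hxs⟩ := first_split row hm
      rw [A_split xs ys hxs, B_split xs ys hxs, ih ys (by simp at h; omega)]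
    · rw [A_nob row hm, B_nob row hm]

-- ===== VERDICT (by name: the statement is the Claim_ definition above) =====
theorem slide_right_spec : Claim_equal_slide_right := by
  intro row _
  unfold Spec_slide_right
  exact main_eq row.length row le_rfl
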